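-- pv_equiv track=rewrite | github.com/PaulMeinheit/Bachelor_Muay_Thai | michealAngMom.py | build_triplet_index_map
-- ===== SOURCE A (Python) =====
-- from typing import Dict, List, Tuple, Optional
--
-- def build_triplet_index_map(names_row1: List[str]) -> Dict[str, List[List[int]]]:
--     """
--     Build a mapping from variable base name -> list of [ix, iy, iz] triplets.
--
--     The CSV is assumed to contain repeated blocks where the same variable names appear
--     multiple times; each occurrence corresponds to one block (e.g., a trial instance).
--
--     Parameters
--     ----------
--     names_row1 : List[str]
--         The variable-name row from the CSV (row index 1 in the current format).
--
--     Returns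
--     -------
--     Dict[str, List[List[int]]]
--         base_name -> [[i0, i1, i2], [i3, i4, i5], ...]
--     """
--     by_name: Dict[str, List[int]] = {}
--     for j, nm in enumerate(names_row1):
--         by_name.setdefault(nm, []).append(j)
--
--     trip_map: Dict[str, List[List[int]]] = {}
--     for base, idxs in by_name.items():
--         idxs_sorted = sorted(idxs)
--
--         # Keep only complete x/y/z sets
--         usable = len(idxs_sorted) - (len(idxs_sorted) % 3)
--         idxs_sorted = idxs_sorted[:usable]
--
--         triplets = [idxs_sorted[k:k+3] for k in range(0, len(idxs_sorted), 3)]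
--         if triplets:
--             trip_map[base] = triplets
--
--     return trip_map
-- ===== SOURCE B (Python) =====
-- from typing import Dict, List
--
--
-- def build_triplet_index_map(names_row1: List[str]) -> Dict[str, List[List[int]]]:
--     """Single pass: per name keep (pending indices, finished triplets); emit each
--     triplet as soon as its third occurrence arrives; leftovers are dropped."""
--     buf: Dict[str, tuple] = {}  # name -> (pending, triplets)
--     for j, nm in enumerate(names_row1):
--         pend, trips = buf.get(nm, ([], []))
--         pend.append(j)
--         if len(pend) == 3:
--             trips.append(pend)
--             pend = []
--         buf[nm] = (pend, trips)
--     return {nm: trips for nm, (_pend, trips) in buf.items() if trips}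
-- ===== Notes on version B (the rewrite author's own statement) =====
-- stated objective: simpler
-- what changed: B replaces A's two-phase collect-all-indices-then-sort/truncate/chunk approach with a single pass that emits each triplet the moment a name's third pending occurrence arrives, dropping the redundant sort and slicing entirely.
import Mathlib
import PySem

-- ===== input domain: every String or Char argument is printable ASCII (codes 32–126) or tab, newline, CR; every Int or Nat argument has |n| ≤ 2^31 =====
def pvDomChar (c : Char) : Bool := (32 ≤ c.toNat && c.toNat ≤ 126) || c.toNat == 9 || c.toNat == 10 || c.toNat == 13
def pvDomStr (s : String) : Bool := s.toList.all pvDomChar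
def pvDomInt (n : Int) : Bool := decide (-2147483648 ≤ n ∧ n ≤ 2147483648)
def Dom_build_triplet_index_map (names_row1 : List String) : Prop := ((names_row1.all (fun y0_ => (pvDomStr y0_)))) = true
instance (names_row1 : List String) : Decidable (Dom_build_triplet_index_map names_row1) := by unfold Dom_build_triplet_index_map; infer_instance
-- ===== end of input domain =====

-- B emits each name's index triplet incrementally in one pass (pending buffer per name)
-- instead of A's collect-everything-then-sort/truncate/chunk; objective: simpler.


-- ===== PORT A =====
-- phase 2 body for one (base, idxs) entry: sort, truncate to a multiple of 3, chunk by 3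
def pvProcA (idxs : List Int) : List (List Int) :=
  let idxs_sorted := PySem.List.sorted idxs (fun x => x)
  let usable : Int := (idxs_sorted.length : Int) - PySem.Int.mod (idxs_sorted.length : Int) 3
  let idxs_sorted := PySem.List.slice idxs_sorted none (some usable)
  (PySem.List.pyRange 0 (idxs_sorted.length : Int) 3).map
    (fun k => PySem.List.slice idxs_sorted (some k) (some (k + 3)))

def build_triplet_index_map (names_row1 : List String) : List (String × List (List Int)) :=
  -- by_name.setdefault(nm, []).append(j)  ==  d[nm] = d.get(nm, []) + [j]  (Dict.modify)
  let by_name : PySem.Dict String (List Int) :=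
    (PySem.List.enumerate names_row1).foldl
      (fun d p => d.modify p.2 [] (· ++ [p.1])) PySem.Dict.empty
  let trip_map : PySem.Dict String (List (List Int)) :=
    by_name.items.foldl
      (fun tm p =>
        let triplets := pvProcA p.2
        if triplets ≠ [] then tm.insert p.1 triplets else tm)
      PySem.Dict.empty
  trip_map.items

-- ===== PORT B =====
-- one step of B's loop body on the (pending, triplets) state of the current name
def pvStepB (s : List Int × List (List Int)) (j : Int) : List Int × List (List Int) :=
  let pend := s.1 ++ [j]
  if pend.length = 3 then ([], s.2 ++ [pend]) else (pend, s.2)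

def build_triplet_index_map_alt (names_row1 : List String) : List (String × List (List Int)) :=
  let buf : PySem.Dict String (List Int × List (List Int)) :=
    (PySem.List.enumerate names_row1).foldl
      (fun d p => d.insert p.2 (pvStepB (d.getD p.2 ([], [])) p.1)) PySem.Dict.empty
  -- dict comprehension over buf.items (keys already unique, order kept) = filterMap
  buf.items.filterMap (fun q => if q.2.2 ≠ [] then some (q.1, q.2.2) else none)

-- ===== PRECONDITION & SPEC =====
def Spec_build_triplet_index_map (names_row1 : List String) (out : List (String × List (List Int))) : Prop := out = build_triplet_index_map_alt names_row1
instance (names_row1 : List String) (out : List (String × List (List Int))) : Decidable (Spec_build_triplet_index_map names_row1 out) := by unfold Spec_build_triplet_index_map; infer_instance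

-- ===== CLAIM (what is proved, stated in full; the proofs are below) =====
def Claim_equal_build_triplet_index_map : Prop := ∀ (names_row1 : List String), Dom_build_triplet_index_map names_row1 → Spec_build_triplet_index_map names_row1 (build_triplet_index_map names_row1)

-- ===== LEMMAS AND PROOFS =====

-- greedy front-to-back chunking into complete triples; the remainder is dropped
def pvChunks3 : List Int → List (List Int)
  | a :: b :: c :: r => [a, b, c] :: pvChunks3 r
  | _ => []

theorem pvChunks3_short (v : List Int) (h : v.length < 3) : pvChunks3 v = [] := by
  match v, h with
  | [], _ => rfl
  | [a], _ => rfl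
  | [a, b], _ => rfl

-- folding B's step is greedy chunking
theorem foldl_stepB_spec (v : List Int) : ∀ (p : List Int) (t : List (List Int)), p.length < 3 →
    (v.foldl pvStepB (p, t)).2 = t ++ pvChunks3 (p ++ v) := by
  induction v with
  | nil =>
    intro p t h
    simp [pvChunks3_short p h]
  | cons x v ih =>
    intro p t h
    simp only [List.foldl_cons, pvStepB]
    by_cases hl : (p ++ [x]).length = 3
    · have h2 : p.length = 2 := by simpa using hl
      obtain ⟨a, b, rfl⟩ : ∃ a b, p = [a, b] := by
        match p, h2 with
        | [a, b], _ => exact ⟨a, b, rfl⟩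
      norm_num
      rw [ih [] (t ++ [[a, b, x]]) (by simp)]
      simp [pvChunks3]
    · rw [if_neg hl]
      rw [ih (p ++ [x]) t (by simp at hl ⊢; omega)]
      simp

-- the truncate-then-slice-by-3 expression is exactly greedy chunking
theorem chunk_expr (ys : List Int) :
    (PySem.List.pyRange 0 (((ys.take (ys.length - ys.length % 3)).length : Nat) : Int) 3).map
      (fun k => PySem.List.slice (ys.take (ys.length - ys.length % 3)) (some k) (some (k + 3)))
    = pvChunks3 ys := by
  induction ys using pvChunks3.induct with
  | case1 a b c r ih =>
    have hm : (a :: b :: c :: r).length % 3 = r.length % 3 := by simp; omega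
    have hle : r.length % 3 ≤ r.length := Nat.mod_le _ _
    set ur := r.length - r.length % 3 with hur
    have hur3 : ur % 3 = 0 := by omega
    have h1 : (a :: b :: c :: r).length - (a :: b :: c :: r).length % 3 = ur + 3 := by
      simp; omega
    rw [h1]
    have htake : (a :: b :: c :: r).take (ur + 3) = a :: b :: c :: r.take ur := by
      simp
    rw [htake]
    have hlen : (a :: b :: c :: r.take ur).length = ur + 3 := by
      simp [List.length_take, Nat.min_eq_left (by omega : ur ≤ r.length)]
    rw [hlen]
    set q := ur / 3 with hq
    have hmap : PySem.List.pyRange 0 ((ur + 3 : Nat) : Int) 3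
        = (List.range (q + 1)).map (fun k : Nat => ((3 * k : Nat) : Int)) := by
      rw [PySem.List.pyRange_of_pos 0 ((ur + 3 : Nat) : Int) (by norm_num)]
      have hc : (if (0 : Int) < ((ur + 3 : Nat) : Int)
          then ((((ur + 3 : Nat) : Int) - 0 + 3 - 1) / 3).toNat else 0) = q + 1 := by
        rw [if_pos (by push_cast; omega)]
        have e : ((ur + 3 : Nat) : Int) - 0 + 3 - 1 = ((ur + 5 : Nat) : Int) := by push_cast; ring
        rw [e]
        have e2 : ((ur + 5 : Nat) : Int) / 3 = (((ur + 5) / 3 : Nat) : Int) := by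
          exact_mod_cast (Int.natCast_div (ur + 5) 3).symm
        rw [e2, Int.toNat_natCast]
        omega
      rw [hc]
      apply List.map_congr_left
      intro k _
      push_cast; ring
    rw [hmap, List.range_succ_eq_map, List.map_cons, List.map_map, List.map_cons, List.map_map]
    have hhead : PySem.List.slice (a :: b :: c :: r.take ur) (some ((3 * 0 : Nat) : Int))
        (some (((3 * 0 : Nat) : Int) + 3)) = [a, b, c] := by
      rw [show (((3 * 0 : Nat) : Int) + 3) = (((3 * 0 : Nat) : Int) + ((3 : Nat) : Int)) by norm_num]
      rw [PySem.List.slice_natCast_add]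
      simp
    show PySem.List.slice _ (some ((3 * 0 : Nat) : Int)) (some (((3 * 0 : Nat) : Int) + 3)) :: _
        = [a, b, c] :: pvChunks3 r
    rw [hhead]
    congr 1
    have ihr : (PySem.List.pyRange 0 ((ur : Nat) : Int) 3).map
        (fun k => PySem.List.slice (r.take ur) (some k) (some (k + 3))) = pvChunks3 r := by
      simpa [List.length_take, Nat.min_eq_left (by omega : ur ≤ r.length)] using ih
    have hmapr : PySem.List.pyRange 0 ((ur : Nat) : Int) 3
        = (List.range q).map (fun k : Nat => ((3 * k : Nat) : Int)) := by
      rw [PySem.List.pyRange_of_pos 0 ((ur : Nat) : Int) (by norm_num)]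
      have hc : (if (0 : Int) < ((ur : Nat) : Int)
          then ((((ur : Nat) : Int) - 0 + 3 - 1) / 3).toNat else 0) = q := by
        by_cases h0 : 0 < ur
        · rw [if_pos (by omega)]
          have e : ((ur : Nat) : Int) - 0 + 3 - 1 = ((ur + 2 : Nat) : Int) := by push_cast; ring
          rw [e]
          have e2 : ((ur + 2 : Nat) : Int) / 3 = (((ur + 2) / 3 : Nat) : Int) := by
            exact_mod_cast (Int.natCast_div (ur + 2) 3).symm
          rw [e2, Int.toNat_natCast]
          omega
        · rw [if_neg (by omega)]
          omega
      rw [hc]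
      apply List.map_congr_left
      intro k _
      push_cast; ring
    rw [hmapr, List.map_map] at ihr
    rw [← ihr]
    apply List.map_congr_left
    intro k hk
    simp only [Function.comp]
    rw [show (((3 * k.succ : Nat) : Int) + 3) = (((3 * k.succ : Nat) : Int) + ((3 : Nat) : Int)) by norm_num]
    rw [show (((3 * k : Nat) : Int) + 3) = (((3 * k : Nat) : Int) + ((3 : Nat) : Int)) by norm_num]
    rw [PySem.List.slice_natCast_add, PySem.List.slice_natCast_add]
    have hd : List.drop (3 * k.succ) (a :: b :: c :: r.take ur) = List.drop (3 * k) (r.take ur) := by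
      rw [show 3 * k.succ = 3 * k + 1 + 1 + 1 by omega]
      simp [List.drop_succ_cons]
    rw [hd]
  | case2 v h =>
    match v, h with
    | [], _ => rfl
    | [a], _ => rfl
    | [a, b], _ => rfl
    | a :: b :: c :: r, h => exact absurd (h a b c r rfl) (by simp)

theorem procA_eq_chunks3 (v : List Int) (hv : v.Pairwise (· < ·)) :
    pvProcA v = pvChunks3 v := by
  unfold pvProcA
  rw [PySem.List.sorted_eq_self_of_pairwise v (fun x => x) (hv.imp le_of_lt)]
  show (PySem.List.pyRange 0
      (((PySem.List.slice v none (some ((v.length : Int) - PySem.Int.mod (v.length : Int) 3))).length : Nat) : Int) 3).map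
      (fun k => PySem.List.slice
        (PySem.List.slice v none (some ((v.length : Int) - PySem.Int.mod (v.length : Int) 3)))
        (some k) (some (k + 3))) = pvChunks3 v
  have hmod : PySem.Int.mod ((v.length : Nat) : Int) 3 = ((v.length % 3 : Nat) : Int) := by
    rw [PySem.Int.mod_eq_emod_of_pos (by norm_num)]
    exact_mod_cast (Int.natCast_mod v.length 3).symm
  rw [hmod]
  have hu : ((v.length : Nat) : Int) - ((v.length % 3 : Nat) : Int)
      = ((v.length - v.length % 3 : Nat) : Int) := by
    push_cast [Nat.mod_le]; omega
  rw [hu, PySem.List.slice_to _ (by positivity)]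
  rw [Int.toNat_natCast]
  exact chunk_expr v

-- A's conditional-insert loop over distinct fresh keys is a filterMap on items
theorem foldl_condInsert_items (g : List Int → List (List Int)) (l : List (String × List Int)) :
    ∀ (tm : PySem.Dict String (List (List Int))),
    (∀ p ∈ l, tm.contains p.1 = false) → (l.map (·.1)).Nodup →
    (l.foldl (fun tm p => let t := g p.2; if t ≠ [] then tm.insert p.1 t else tm) tm).items
      = tm.items ++ l.filterMap (fun p => let t := g p.2; if t ≠ [] then some (p.1, t) else none) := by
  induction l with
  | nil => intro tm _ _; simp
  | cons p l ih =>
    intro tm hfresh hnd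
    have hp : tm.contains p.1 = false := hfresh p (by simp)
    rw [List.map_cons, List.nodup_cons] at hnd
    have hnd' : (l.map (·.1)).Nodup := hnd.2
    have hne : ∀ q ∈ l, q.1 ≠ p.1 := by
      intro q hq he
      exact hnd.1 (he ▸ List.mem_map_of_mem hq)
    simp only [List.foldl_cons, List.filterMap_cons]
    by_cases ht : g p.2 ≠ []
    · rw [if_pos ht]
      rw [ih (tm.insert p.1 (g p.2))
          (by intro q hq
              rw [PySem.Dict.contains_insert]
              simp [hne q hq, hfresh q (List.mem_cons_of_mem _ hq)])
          hnd']
      rw [PySem.Dict.items_insert_of_not_contains tm _ hp]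
      simp [ht]
    · simp only [ne_eq, not_not] at ht
      rw [if_neg (by simp [ht])]
      rw [ih tm (fun q hq => hfresh q (List.mem_cons_of_mem _ hq)) hnd']
      simp [ht]

-- the phase-1 invariant tying A's by_name to B's buf
def pvRel (dA : PySem.Dict String (List Int))
    (dB : PySem.Dict String (List Int × List (List Int))) (s : Int) : Prop :=
  dA.keys.Nodup ∧
  dB.items = dA.items.map (fun q => (q.1, q.2.foldl pvStepB ([], []))) ∧
  (∀ q ∈ dA.items, (∀ x ∈ q.2, x < s) ∧ q.2.Pairwise (· < ·))

theorem pvRel_step (dA : PySem.Dict String (List Int))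
    (dB : PySem.Dict String (List Int × List (List Int))) (s : Int) (nm : String)
    (h : pvRel dA dB s) :
    pvRel (dA.modify nm [] (· ++ [s])) (dB.insert nm (pvStepB (dB.getD nm ([], [])) s)) (s + 1) := by
  obtain ⟨hnd, hit, hvp⟩ := h
  simp only [PySem.Dict.modify]
  have hkeys : dB.keys = dA.keys := by
    show dB.items.map (·.1) = dA.items.map (·.1)
    rw [hit, List.map_map]
    rfl
  have hcont : ∀ k, dB.contains k = dA.contains k := by
    intro k
    rw [PySem.Dict.contains_eq_decide_mem_keys, PySem.Dict.contains_eq_decide_mem_keys, hkeys]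
  have hvals' : ∀ q ∈ (dA.insert nm (dA.getD nm [] ++ [s])).items,
      (∀ x ∈ q.2, x < s + 1) ∧ q.2.Pairwise (· < ·) := by
    intro q hq
    rcases (PySem.Dict.mem_items_insert dA _ _ _).mp hq with hq1 | ⟨hq2, _⟩
    · subst hq1
      have hvAold : (∀ x ∈ dA.getD nm [], x < s) ∧ (dA.getD nm []).Pairwise (· < ·) := by
        by_cases hc : dA.contains nm = true
        · have hsome : (dA.get? nm).isSome := by
            rw [← PySem.Dict.contains_eq_isSome_get? dA nm]; exact hc
          obtain ⟨vA, hvA⟩ := Option.isSome_iff_exists.mp hsome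
          rw [PySem.Dict.getD_of_get?_eq_some dA [] hvA]
          exact hvp (nm, vA) (PySem.Dict.mem_items_of_get?_eq_some dA hvA)
        · rw [PySem.Dict.getD_of_not_contains dA [] (by simpa using hc)]
          simp
      constructor
      · intro x hx
        rcases List.mem_append.mp hx with hx1 | hx2
        · exact lt_trans (hvAold.1 x hx1) (by omega)
        · simp at hx2; omega
      · rw [List.pairwise_append]
        exact ⟨hvAold.2, List.pairwise_singleton _ _, by
          intro x hx y hy; simp at hy; subst hy; exact hvAold.1 x hx⟩
    · obtain ⟨hb, hp⟩ := hvp q hq2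
      exact ⟨fun x hx => lt_trans (hb x hx) (by omega), hp⟩
  by_cases hc : dA.contains nm = true
  · have hsome : (dA.get? nm).isSome := by
      rw [← PySem.Dict.contains_eq_isSome_get? dA nm]; exact hc
    obtain ⟨vA, hvA⟩ := Option.isSome_iff_exists.mp hsome
    have hgA : dA.getD nm [] = vA := PySem.Dict.getD_of_get?_eq_some dA [] hvA
    have hmemA : (nm, vA) ∈ dA.items := PySem.Dict.mem_items_of_get?_eq_some dA hvA
    have hmemB : (nm, vA.foldl pvStepB ([], [])) ∈ dB.items := by
      rw [hit]
      exact List.mem_map_of_mem hmemA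
    have hndB : dB.keys.Nodup := hkeys ▸ hnd
    have hgB : dB.getD nm ([], []) = vA.foldl pvStepB ([], []) :=
      PySem.Dict.getD_of_mem_items dB hmemB hndB _
    refine ⟨PySem.Dict.nodup_keys_insert dA nm _ hnd, ?_, hvals'⟩
    rw [PySem.Dict.items_insert_of_contains dB _ (by rw [hcont]; exact hc),
        PySem.Dict.items_insert_of_contains dA _ hc, hit,
        List.map_map, List.map_map]
    apply List.map_congr_left
    intro q hq
    simp only [Function.comp]
    by_cases hq1 : q.1 = nm
    · simp only [hq1, BEq.rfl, if_true, hgB, hgA]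
      rw [List.foldl_append]
      rfl
    · have hb : (q.1 == nm) = false := by simpa using hq1
      simp [hb]
  · have hcB : dB.contains nm = false := by rw [hcont]; simpa using hc
    have hcA : dA.contains nm = false := by simpa using hc
    have hgA : dA.getD nm [] = [] := PySem.Dict.getD_of_not_contains dA [] hcA
    have hgB : dB.getD nm ([], []) = ([], []) := PySem.Dict.getD_of_not_contains dB ([], []) hcB
    refine ⟨PySem.Dict.nodup_keys_insert dA nm _ hnd, ?_, hvals'⟩
    rw [PySem.Dict.items_insert_of_not_contains dB _ hcB,
        PySem.Dict.items_insert_of_not_contains dA _ hcA, hit,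
        List.map_append]
    congr 1
    simp [hgA, hgB]

theorem pvRel_fold (names : List String) : ∀ (s : Int) dA dB, pvRel dA dB s →
    pvRel ((PySem.List.enumerate names s).foldl (fun d p => d.modify p.2 [] (· ++ [p.1])) dA)
          ((PySem.List.enumerate names s).foldl (fun d p => d.insert p.2 (pvStepB (d.getD p.2 ([], [])) p.1)) dB)
          (s + names.length) := by
  induction names with
  | nil => intro s dA dB h; simpa using h
  | cons x xs ih =>
    intro s dA dB h
    rw [PySem.List.enumerate_cons]
    simp only [List.foldl_cons]
    have := ih (s + 1) _ _ (pvRel_step dA dB s x h)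
    simpa [add_assoc, add_comm, add_left_comm] using this

-- ===== VERDICT (by name: the statement is the Claim_ definition above) =====
theorem build_triplet_index_map_spec : Claim_equal_build_triplet_index_map := by
  intro names _
  unfold Spec_build_triplet_index_map build_triplet_index_map build_triplet_index_map_alt
  have h0 : pvRel PySem.Dict.empty PySem.Dict.empty 0 := by
    refine ⟨PySem.Dict.nodup_keys_empty, ?_, ?_⟩ <;> simp [PySem.Dict.empty]
  have hrel := pvRel_fold names 0 _ _ h0
  obtain ⟨hnd, hitems, hvals⟩ := by simpa using hrel
  set dA := (PySem.List.enumerate names).foldl (fun d p => d.modify p.2 [] (· ++ [p.1])) PySem.Dict.empty with hdA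
  set dB := (PySem.List.enumerate names).foldl (fun d p => d.insert p.2 (pvStepB (d.getD p.2 ([], [])) p.1)) PySem.Dict.empty with hdB
  rw [foldl_condInsert_items pvProcA dA.items PySem.Dict.empty
      (by intro p _; exact PySem.Dict.contains_empty _) (by exact hnd)]
  show _ = List.filterMap (fun q => if q.2.2 ≠ [] then some (q.1, q.2.2) else none) dB.items
  rw [hitems, List.filterMap_map]
  have hemp : (PySem.Dict.empty : PySem.Dict String (List (List Int))).items = [] := rfl
  rw [hemp, List.nil_append]
  apply List.filterMap_congr
  intro q hq
  have hpq := (hvals q hq).2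
  have : pvProcA q.2 = (q.2.foldl pvStepB ([], [])).2 := by
    rw [procA_eq_chunks3 q.2 hpq, foldl_stepB_spec q.2 [] [] (by simp)]
    simp
  simp only [Function.comp]
  rw [← this]
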